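-- pv_equiv track=rewrite | github.com/rsoni8672/algorithms | 347_top_k_frequent.py | get_frequency_wise_map
-- ===== SOURCE A (Python) =====
-- def get_frequency_wise_map(freq_map):
--     temp_map = {}
--     for freq in freq_map:
--         val = freq_map[freq]
--
--         temp = temp_map.get(val, [])
--         temp.append(freq)
--         temp_map[val] = temp
--     return temp_map
-- ===== SOURCE B (Python) =====
-- def get_frequency_wise_map(freq_map):
--     vals = list(dict.fromkeys(freq_map.values()))
--     return {v: [k for k, w in freq_map.items() if w == v] for v in vals}
-- ===== Notes on version B (the rewrite author's own statement) =====
-- stated objective: alternative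
-- what changed: B replaces A's incremental dict-of-lists accumulation by computing the distinct values once (dict.fromkeys) and building each group with a filtering comprehension over the items.
import Mathlib
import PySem

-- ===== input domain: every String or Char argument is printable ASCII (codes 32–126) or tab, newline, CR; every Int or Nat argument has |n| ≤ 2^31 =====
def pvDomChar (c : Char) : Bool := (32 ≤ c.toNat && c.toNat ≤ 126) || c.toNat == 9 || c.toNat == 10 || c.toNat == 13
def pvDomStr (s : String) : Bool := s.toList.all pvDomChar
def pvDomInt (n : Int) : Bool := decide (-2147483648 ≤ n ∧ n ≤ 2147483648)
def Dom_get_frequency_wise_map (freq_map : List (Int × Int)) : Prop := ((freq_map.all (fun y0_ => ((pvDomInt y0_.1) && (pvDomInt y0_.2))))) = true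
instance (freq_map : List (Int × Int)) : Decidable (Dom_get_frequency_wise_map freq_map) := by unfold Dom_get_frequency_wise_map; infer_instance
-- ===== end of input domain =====

-- B groups keys per distinct value by filtering (nested scans) instead of A's incremental dict-of-lists accumulation; objective: alternative.


-- ===== PORT A =====
def get_frequency_wise_map (freq_map : List (Int × Int)) : List (Int × List Int) :=
  -- for freq in freq_map: iterates the dict's keys; freq_map[freq] always succeeds (freq is a key),
  -- so getD with an unused default only totalizes the lookup
  ((PySem.Dict.mk freq_map).keys.foldl (fun (temp_map : PySem.Dict Int (List Int)) freq =>
      let val := (PySem.Dict.mk freq_map).getD freq 0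
      let temp := temp_map.getD val []
      temp_map.insert val (temp ++ [freq])) PySem.Dict.empty).items

-- ===== PORT B =====
def get_frequency_wise_map_alt (freq_map : List (Int × Int)) : List (Int × List Int) :=
  let vals := PySem.List.dedup (freq_map.map Prod.snd)
  vals.map (fun v => (v, (freq_map.filter (fun p => p.2 == v)).map Prod.fst))

-- ===== PRECONDITION & SPEC =====
-- Pre_ excludes only association lists with duplicate keys: a Python dict argument can never
-- have duplicate keys, so these lists represent no input of A at all.
def Pre_get_frequency_wise_map (freq_map : List (Int × Int)) : Prop :=
  (freq_map.map Prod.fst).Nodup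
instance (freq_map : List (Int × Int)) : Decidable (Pre_get_frequency_wise_map freq_map) := by unfold Pre_get_frequency_wise_map; infer_instance
def pvWitness_get_frequency_wise_map : (List (Int × Int)) := [(1, 2), (3, 2), (4, 5)]
def Spec_get_frequency_wise_map (freq_map : List (Int × Int)) (out : List (Int × List Int)) : Prop := out = get_frequency_wise_map_alt freq_map
instance (freq_map : List (Int × Int)) (out : List (Int × List Int)) : Decidable (Spec_get_frequency_wise_map freq_map out) := by unfold Spec_get_frequency_wise_map; infer_instance

-- ===== CLAIM (what is proved, stated in full; the proofs are below) =====
def Claim_equal_get_frequency_wise_map : Prop := ∀ (freq_map : List (Int × Int)), Dom_get_frequency_wise_map freq_map → Pre_get_frequency_wise_map freq_map → Spec_get_frequency_wise_map freq_map (get_frequency_wise_map freq_map)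

-- ===== LEMMAS AND PROOFS =====

-- A's loop, rewritten over the (value, key) pairs, is the standard grouping fold.
lemma getA_eq_group (freq_map : List (Int × Int)) (h : (freq_map.map Prod.fst).Nodup) :
    get_frequency_wise_map freq_map =
      ((freq_map.map (fun p => (p.2, p.1))).foldl
        (fun (d : PySem.Dict Int (List Int)) q => d.modify q.1 [] (· ++ [q.2]))
        PySem.Dict.empty).items := by
  unfold get_frequency_wise_map
  have hkeys : (PySem.Dict.mk freq_map).keys = freq_map.map Prod.fst := rfl
  rw [hkeys, List.foldl_map, List.foldl_map]
  congr 1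
  apply PySem.List.foldl_congr_mem
  intro acc p hp
  have hval : (PySem.Dict.mk freq_map).getD p.1 0 = p.2 :=
    PySem.Dict.getD_of_mem_items (d := PySem.Dict.mk freq_map) (k := p.1) (v := p.2) hp h 0
  simp only [hval]
  rfl

-- ===== VERDICT (by name: the statement is the Claim_ definition above) =====

theorem get_frequency_wise_map_spec : Claim_equal_get_frequency_wise_map := by
  intro freq_map _ hpre
  unfold Spec_get_frequency_wise_map
  rw [getA_eq_group freq_map hpre]
  set l' := freq_map.map (fun p => (p.2, p.1)) with hl'
  have hnd : ((l'.foldl (fun (d : PySem.Dict Int (List Int)) q => d.modify q.1 [] (· ++ [q.2]))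
      PySem.Dict.empty).keys).Nodup := by
    exact PySem.Dict.nodup_keys_foldl_modify_key l' (fun q => q.1) [] (fun _ q => (· ++ [q.2]))
      PySem.Dict.empty PySem.Dict.nodup_keys_empty
  rw [PySem.Dict.items_eq_map_keys _ hnd []]
  have hkeys : (l'.foldl (fun (d : PySem.Dict Int (List Int)) q => d.modify q.1 [] (· ++ [q.2]))
      PySem.Dict.empty).keys = PySem.Set.ofList (freq_map.map Prod.snd) := by
    rw [PySem.Dict.keys_foldl_modify_key]
    simp [hl', PySem.Set.update, PySem.Set.ofList, List.map_map, PySem.Dict.keys_empty]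
    rfl
  rw [hkeys]
  unfold get_frequency_wise_map_alt
  have hdedup : PySem.List.dedup (freq_map.map Prod.snd) = PySem.Set.ofList (freq_map.map Prod.snd) := by
    simp [PySem.List.dedup, PySem.Set.ofList]
  rw [hdedup]
  apply List.map_congr_left
  intro v _
  congr 1
  rw [PySem.Dict.getD_foldl_modify_append]
  simp only [hl', List.filter_map, List.map_map, PySem.Dict.getD_empty, Function.comp_def]
  rfl
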